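-- pv_equiv track=rewrite | github.com/extra-virgin-olive-eul/pe_solutions | 32/uninformed.py | pair_product_is_pandigital
-- ===== SOURCE A (Python) =====
-- def pair_product_is_pandigital(pair):
--     left, right = pair
--     product = left * right
--     str_expr = [e for e in str(left) + str(right) + str(product)]
--     str_expr.sort()
--     if str_expr == ['1', '2', '3', '4', '5', '6', '7', '8', '9']:
--         return (left, right, product)
--     else:
--         return False
-- ===== SOURCE B (Python) =====
-- def pair_product_is_pandigital(pair):
--     left, right = pair
--     product = left * right
--     seen = set()
--     for c in str(left) + str(right) + str(product):
--         if c not in '123456789' or c in seen: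
--             return False
--         seen.add(c)
--     if len(seen) == 9:
--         return (left, right, product)
--     return False
-- ===== Notes on version B (the rewrite author's own statement) =====
-- stated objective: idiomatic
-- what changed: Replaces build-list/sort/compare with a single early-exit pass that maintains a seen-set of digits, rejecting any non-1..9 character or duplicate immediately and finally checking that nine distinct digits were seen.
import Mathlib
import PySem

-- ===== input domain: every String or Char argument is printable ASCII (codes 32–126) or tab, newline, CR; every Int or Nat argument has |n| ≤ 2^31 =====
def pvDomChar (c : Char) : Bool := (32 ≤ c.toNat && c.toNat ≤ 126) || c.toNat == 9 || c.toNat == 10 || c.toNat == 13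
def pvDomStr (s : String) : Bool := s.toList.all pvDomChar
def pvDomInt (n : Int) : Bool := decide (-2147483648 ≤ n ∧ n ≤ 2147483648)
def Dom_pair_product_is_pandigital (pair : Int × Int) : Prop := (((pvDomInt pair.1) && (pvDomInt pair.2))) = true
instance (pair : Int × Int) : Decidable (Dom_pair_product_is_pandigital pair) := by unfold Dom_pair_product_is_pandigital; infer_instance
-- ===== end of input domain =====

-- B replaces sort-and-compare with one early-exit pass over the digits maintaining a seen-set (idiomatic);
-- equivalence is about the truth value (Python A/B return a tuple when pandigital, False otherwise).

-- ===== PORT A =====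
def pair_product_is_pandigital (pair : Int × Int) : Bool :=
  let left := pair.1
  let right := pair.2
  let product := left * right
  let str_expr := (PySem.Int.toStr left ++ PySem.Int.toStr right ++ PySem.Int.toStr product).toList
  let str_expr := PySem.List.sorted str_expr (fun x => x) false
  str_expr == ['1', '2', '3', '4', '5', '6', '7', '8', '9']

-- ===== PORT B =====
-- the early-return for-loop of Source B: seen-set accumulator, none = returned False
def pandigitalLoop : List Char → PySem.Set Char → Option (PySem.Set Char)
  | [], seen => some seen
  | c :: rest, seen =>
      if ¬ (PySem.Set.contains "123456789".toList c) ∨ PySem.Set.contains seen c then none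
      else pandigitalLoop rest (PySem.Set.add seen c)

def pair_product_is_pandigital_alt (pair : Int × Int) : Bool :=
  let left := pair.1
  let right := pair.2
  let product := left * right
  match pandigitalLoop (PySem.Int.toStr left ++ PySem.Int.toStr right ++ PySem.Int.toStr product).toList PySem.Set.empty with
  | none => false
  | some seen => PySem.Set.len seen == 9

-- ===== PRECONDITION & SPEC =====
def Spec_pair_product_is_pandigital (pair : Int × Int) (out : Bool) : Prop := out = pair_product_is_pandigital_alt pair
instance (pair : Int × Int) (out : Bool) : Decidable (Spec_pair_product_is_pandigital pair out) := by unfold Spec_pair_product_is_pandigital; infer_instance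

-- ===== CLAIM (what is proved, stated in full; the proofs are below) =====
def Claim_equal_pair_product_is_pandigital : Prop := ∀ (pair : Int × Int), Dom_pair_product_is_pandigital pair → Spec_pair_product_is_pandigital pair (pair_product_is_pandigital pair)

-- ===== LEMMAS AND PROOFS =====

def pvDigits : List Char := ['1','2','3','4','5','6','7','8','9']

theorem pvDigits_eq : "123456789".toList = pvDigits := by decide

-- the loop succeeds exactly on nodup lists of digits fresh w.r.t. the accumulator, returning acc ++ l
theorem pandigitalLoop_eq_some_iff (l : List Char) (acc : PySem.Set Char) (hacc : acc.Nodup) (r : PySem.Set Char) :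
    pandigitalLoop l acc = some r ↔
      (∀ c ∈ l, c ∈ pvDigits) ∧ (acc ++ l).Nodup ∧ r = acc ++ l := by
  induction l generalizing acc with
  | nil => simp [pandigitalLoop, hacc, eq_comm]
  | cons c rest ih =>
    rw [pandigitalLoop, pvDigits_eq]
    by_cases hd : c ∈ pvDigits
    · by_cases hs : c ∈ acc
      · rw [if_pos (Or.inr ((PySem.Set.contains_iff _ _).2 hs))]
        simp only [false_iff, (by simp : (none : Option (PySem.Set Char)) = some r ↔ False)]
        rintro ⟨-, hnd, -⟩
        rcases List.nodup_append.1 hnd with ⟨-, -, hdisj⟩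
        exact hdisj c hs c (List.mem_cons_self ..) rfl
      · have hadd : PySem.Set.add acc c = acc ++ [c] := by
          simp [PySem.Set.add, PySem.Set.contains_eq_listContains]
          intro hmem
          exact absurd hmem hs
        rw [if_neg (by
          rintro (hc | hc)
          · exact hc ((PySem.Set.contains_iff _ _).2 hd)
          · exact hs ((PySem.Set.contains_iff _ _).1 hc))]
        rw [ih (PySem.Set.add acc c) (by
          rw [hadd, List.nodup_append]
          exact ⟨hacc, List.nodup_singleton _,
            fun a ha b hb => by
              rw [List.mem_singleton] at hb
              subst hb
              exact fun h => hs (h ▸ ha)⟩)]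
        rw [hadd]
        constructor
        · rintro ⟨h1, h2, h3⟩
          refine ⟨?_, by simpa using h2, by simpa using h3⟩
          intro x hx
          rcases List.mem_cons.1 hx with hx | hx
          · exact hx ▸ hd
          · exact h1 x hx
        · rintro ⟨h1, h2, h3⟩
          exact ⟨fun x hx => h1 x (List.mem_cons_of_mem _ hx), by simpa using h2, by simpa using h3⟩
    · rw [if_pos (Or.inl (fun hc => hd ((PySem.Set.contains_iff _ _).1 hc)))]
      simp only [false_iff, (by simp : (none : Option (PySem.Set Char)) = some r ↔ False)]
      rintro ⟨h1, -, -⟩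
      exact hd (h1 c (List.mem_cons_self ..))

-- characterization of B on an arbitrary character list
def bOfChars (s : List Char) : Bool :=
  match pandigitalLoop s PySem.Set.empty with
  | none => false
  | some seen => PySem.Set.len seen == 9

theorem bOfChars_true_iff (s : List Char) :
    bOfChars s = true ↔ s.Nodup ∧ (∀ c ∈ s, c ∈ pvDigits) ∧ s.length = 9 := by
  unfold bOfChars
  cases h : pandigitalLoop s PySem.Set.empty with
  | none =>
    simp only [Bool.false_eq_true, false_iff]
    rintro ⟨hnd, hmem, -⟩
    have h2 := (pandigitalLoop_eq_some_iff s PySem.Set.empty (by simp [PySem.Set.empty]) s).2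
      ⟨hmem, by simpa [PySem.Set.empty] using hnd, by simp [PySem.Set.empty]⟩
    rw [h] at h2
    simp at h2
  | some seen =>
    have h2 := (pandigitalLoop_eq_some_iff s PySem.Set.empty (by simp [PySem.Set.empty]) seen).1 h
    rcases h2 with ⟨hmem, hnd, hr⟩
    simp [PySem.Set.empty] at hnd hr
    subst hr
    simp only [PySem.Set.len, beq_iff_eq, hnd, true_and]
    constructor
    · intro hlen; exact ⟨hmem, by exact_mod_cast hlen⟩
    · rintro ⟨-, hlen⟩; exact_mod_cast hlen

-- A is true iff the character list is a permutation of the nine digits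
theorem aOfChars_true_iff (s : List Char) :
    (PySem.List.sorted s (fun x => x) false = pvDigits) ↔ s.Perm pvDigits := by
  constructor
  · intro h
    have hp : (PySem.List.sorted s (fun x => x) false).Perm s := PySem.List.sorted_perm ..
    rw [h] at hp
    exact hp.symm
  · intro h
    apply PySem.List.sorted_id_eq_of_perm_of_pairwise
    · exact h.symm
    · decide

theorem perm_digits_iff (s : List Char) :
    s.Perm pvDigits ↔ s.Nodup ∧ (∀ c ∈ s, c ∈ pvDigits) ∧ s.length = 9 := by
  constructor
  · intro h
    exact ⟨h.nodup_iff.2 (by decide), fun c hc => h.mem_iff.1 hc, by simpa using h.length_eq⟩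
  · rintro ⟨hnd, hmem, hlen⟩
    have hsp : s.Subperm pvDigits := hnd.subperm hmem
    exact hsp.perm_of_length_le (by simp [pvDigits, hlen])

-- ===== VERDICT (by name: the statement is the Claim_ definition above) =====
theorem pair_product_is_pandigital_spec : Claim_equal_pair_product_is_pandigital := by
  intro pair _
  unfold Spec_pair_product_is_pandigital pair_product_is_pandigital pair_product_is_pandigital_alt
  simp only []
  set s := (PySem.Int.toStr pair.1 ++ PySem.Int.toStr pair.2 ++ PySem.Int.toStr (pair.1 * pair.2)).toList with hs
  have hb : (match pandigitalLoop s PySem.Set.empty with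
      | none => false
      | some seen => PySem.Set.len seen == 9) = bOfChars s := rfl
  rw [hb, show (['1','2','3','4','5','6','7','8','9'] : List Char) = pvDigits from rfl]
  rcases hB : bOfChars s with _ | _
  · rcases hA : (PySem.List.sorted s (fun x => x) false == pvDigits : Bool) with _ | _
    · rfl
    · exfalso
      have h1 := (aOfChars_true_iff s).1 (by simpa using hA)
      have h2 := (bOfChars_true_iff s).2 ((perm_digits_iff s).1 h1)
      rw [hB] at h2
      exact Bool.noConfusion h2
  · exact beq_iff_eq.mpr ((aOfChars_true_iff s).2 ((perm_digits_iff s).2 ((bOfChars_true_iff s).1 hB)))
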